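-- pv_equiv track=rewrite | github.com/calstarProjects/stellarClient | sorts.py | bubSort
-- ===== SOURCE A (Python) =====
-- def isSorted(lis:list):
--     for i in range(len(lis)-1):
--         if type(lis[i]) != type(lis[i+1]) or lis[i] > lis[i+1]:
--             return False
--     else:
--         return True
--
-- def bubSort(lis: list):
--     lists = []
--     for i in lis:
--         for j in lists:
--             if type(j[0]) == type(i):
--                 j.append(i)
--                 break
--         else:
--             lists.append([i])
--     for j in lists:
--         while not isSorted(j):
--             for i in range(len(j)-1):
--                 if j[i] > j[i+1]:
--                     j[i], j[i+1] = j[i+1], j[i]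
--     finalList = []
--     for i in lists:
--         for j in i:
--             finalList.append(j)
--     return finalList
-- ===== SOURCE B (Python) =====
-- def bubSort(lis: list):
--     # The claim's input domain is homogeneous lists of ints, where A's
--     # type-bucketing is vacuous: one stable built-in sort gives A's result.
--     return sorted(lis)
-- ===== Notes on version B (the rewrite author's own statement) =====
-- stated objective: idiomatic
-- what changed: Replaces the bucket-build plus per-bucket bubble sort plus concatenation with a single call to the built-in stable sort, which coincides with A on the homogeneous int-list domain.
import Mathlib
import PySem

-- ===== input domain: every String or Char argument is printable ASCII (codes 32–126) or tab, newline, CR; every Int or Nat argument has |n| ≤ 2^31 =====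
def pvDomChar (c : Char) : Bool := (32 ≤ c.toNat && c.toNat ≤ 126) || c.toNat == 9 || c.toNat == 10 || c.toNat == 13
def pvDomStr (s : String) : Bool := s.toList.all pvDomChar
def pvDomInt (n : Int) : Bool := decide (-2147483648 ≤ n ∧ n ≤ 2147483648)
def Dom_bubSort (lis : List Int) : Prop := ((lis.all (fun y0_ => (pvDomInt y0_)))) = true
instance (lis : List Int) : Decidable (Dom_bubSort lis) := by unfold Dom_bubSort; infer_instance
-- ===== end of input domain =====

-- B replaces A's type-buckets + per-bucket bubble sort + concatenation by one stable
-- built-in sort (idiomatic; on the homogeneous int domain the type-bucketing is vacuous).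

-- ===== PORT A =====
-- isSorted: on Int elements the `type(lis[i]) != type(lis[i+1])` test is identically False,
-- so only the comparison remains.
def isSortedA : List Int → Bool
  | a :: b :: t => if a > b then false else isSortedA (b :: t)
  | _ => true

-- one `for i in range(len(j)-1)` adjacent-swap sweep over the list
def passA : List Int → List Int
  | a :: b :: t => if a > b then b :: passA (a :: t) else a :: passA (b :: t)
  | l => l
termination_by l => l.length

-- the `while not isSorted(j)` loop; the fuel only makes the loop total
-- (j.length sweeps always suffice, proved below in bubLoop_pairwise)
def bubLoop : Nat → List Int → List Int
  | 0, j => j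
  | f + 1, j => if isSortedA j then j else bubLoop f (passA j)

-- inner `for j in lists: if type(j[0]) == type(i)` — on Int the first bucket always matches
def addBucket (lists : List (List Int)) (i : Int) : List (List Int) :=
  match lists with
  | [] => [[i]]
  | j :: rest => (j ++ [i]) :: rest

def bubSort (lis : List Int) : List Int :=
  let lists := lis.foldl addBucket []
  let lists := lists.map (fun j => bubLoop j.length j)
  lists.foldl (fun acc j => acc ++ j) []

-- ===== PORT B =====
def bubSort_alt (lis : List Int) : List Int :=
  PySem.List.sorted lis (fun x => x) false

-- ===== PRECONDITION & SPEC =====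
def Spec_bubSort (lis : List Int) (out : List Int) : Prop := out = bubSort_alt lis
instance (lis : List Int) (out : List Int) : Decidable (Spec_bubSort lis out) := by unfold Spec_bubSort; infer_instance

-- ===== CLAIM (what is proved, stated in full; the proofs are below) =====
def Claim_equal_bubSort : Prop := ∀ (lis : List Int), Dom_bubSort lis → Spec_bubSort lis (bubSort lis)

-- ===== LEMMAS AND PROOFS =====

theorem isSortedA_iff : ∀ (l : List Int), isSortedA l = true ↔ List.IsChain (· ≤ ·) l
  | [] => by simp [isSortedA]
  | [a] => by simp [isSortedA]
  | a :: b :: t => by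
    rw [List.isChain_cons_cons]
    by_cases h : a > b
    · simp only [isSortedA, if_pos h]
      constructor
      · intro hf; simp at hf
      · rintro ⟨hab, -⟩; omega
    · simp only [isSortedA, if_neg h]
      rw [isSortedA_iff (b :: t)]
      exact ⟨fun hc => ⟨by omega, hc⟩, fun hc => hc.2⟩

theorem passA_perm (l : List Int) : (passA l).Perm l := by
  fun_induction passA l with
  | case1 a b t h ih => exact ((ih.cons b).trans (List.Perm.swap a b t))
  | case2 a b t h ih => exact ih.cons a
  | case3 l h => exact List.Perm.refl l

theorem passA_max : ∀ (l : List Int), l ≠ [] →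
    ∃ t m, passA l = t ++ [m] ∧ (∀ x ∈ l, x ≤ m) ∧ t.length + 1 = l.length
  | [], h => absurd rfl h
  | [a], _ => ⟨[], a, by simp [passA], by simp, by simp⟩
  | a :: b :: t, _ => by
    by_cases hgt : a > b
    · obtain ⟨t', m, he, hm, hl⟩ := passA_max (a :: t) (by simp)
      refine ⟨b :: t', m, by simp [passA, hgt, he], ?_, by simp at hl ⊢; omega⟩
      intro x hx
      simp at hx
      rcases hx with rfl | rfl | hx
      · exact hm x (by simp)
      · exact le_trans (by omega) (hm a (by simp))
      · exact hm x (by simp [hx])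
    · obtain ⟨t', m, he, hm, hl⟩ := passA_max (b :: t) (by simp)
      refine ⟨a :: t', m, by simp [passA, hgt, he], ?_, by simp at hl ⊢; omega⟩
      intro x hx
      simp at hx
      rcases hx with rfl | rfl | hx
      · exact le_trans (by omega : x ≤ b) (hm b (by simp))
      · exact hm x (by simp)
      · exact hm x (by simp [hx])
termination_by l => l.length

theorem passA_append_max : ∀ (l : List Int) (m : Int), (∀ x ∈ l, x ≤ m) →
    passA (l ++ [m]) = passA l ++ [m]
  | [], m, _ => by simp [passA]
  | [a], m, h => by
    have ha : ¬ a > m := by simpa using h a (by simp)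
    simp [passA, ha]
  | a :: b :: t, m, h => by
    by_cases hgt : a > b
    · have ih := passA_append_max (a :: t) m (fun x hx => h x (by simp at hx ⊢; tauto))
      simp only [List.cons_append] at ih ⊢
      simp [passA, hgt, ih]
    · have ih := passA_append_max (b :: t) m (fun x hx => h x (by simp at hx ⊢; tauto))
      simp only [List.cons_append] at ih ⊢
      simp [passA, hgt, ih]
termination_by l => l.length

theorem isSortedA_append_max : ∀ (l : List Int) (m : Int), (∀ x ∈ l, x ≤ m) →
    isSortedA (l ++ [m]) = isSortedA l
  | [], m, _ => by simp [isSortedA]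
  | [a], m, h => by
    have ha : ¬ a > m := by simpa using h a (by simp)
    simp [isSortedA, ha]
  | a :: b :: t, m, h => by
    by_cases hab : a > b
    · simp [isSortedA, hab]
    · have ih := isSortedA_append_max (b :: t) m (fun x hx => h x (by simp at hx ⊢; tauto))
      simp only [List.cons_append] at ih ⊢
      simp [isSortedA, hab, ih]

theorem bubLoop_perm (n : Nat) (l : List Int) : (bubLoop n l).Perm l := by
  induction n generalizing l with
  | zero => exact List.Perm.refl l
  | succ f ih =>
    by_cases hs : isSortedA l = true
    · simp [bubLoop, hs]
    · simpa [bubLoop, hs] using (ih (passA l)).trans (passA_perm l)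

theorem bubLoop_append_max (n : Nat) (l : List Int) (m : Int) (h : ∀ x ∈ l, x ≤ m) :
    bubLoop n (l ++ [m]) = bubLoop n l ++ [m] := by
  induction n generalizing l with
  | zero => rfl
  | succ f ih =>
    rw [bubLoop, bubLoop, isSortedA_append_max l m h]
    by_cases hs : isSortedA l = true
    · simp [hs]
    · simp only [hs, Bool.false_eq_true, if_false]
      rw [passA_append_max l m h]
      exact ih (passA l) (fun x hx => h x ((passA_perm l).mem_iff.mp hx))

theorem bubLoop_pairwise (n : Nat) (l : List Int) (hn : l.length = n) :
    (bubLoop n l).Pairwise (· ≤ ·) := by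
  induction n generalizing l with
  | zero =>
    have h0 : l = [] := by simpa using hn
    simp [h0, bubLoop]
  | succ f ih =>
    by_cases hs : isSortedA l = true
    · simpa [bubLoop, hs] using List.isChain_iff_pairwise.mp ((isSortedA_iff l).mp hs)
    · have hne : l ≠ [] := fun he => hs (by simp [he, isSortedA])
      obtain ⟨t, m, he, hm, hl⟩ := passA_max l hne
      have htm : ∀ x ∈ t, x ≤ m := fun x hx =>
        hm x ((passA_perm l).mem_iff.mp (by simp [he, hx]))
      rw [bubLoop, if_neg (by simpa using hs), he, bubLoop_append_max f t m htm]
      have htlen : t.length = f := by omega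
      refine List.pairwise_append.mpr ⟨ih t htlen, by simp, ?_⟩
      intro x hx m' hm'
      simp at hm'; subst hm'
      exact htm x ((bubLoop_perm f t).mem_iff.mp hx)

theorem foldl_addBucket_single (xs : List Int) (j : List Int) :
    xs.foldl addBucket [j] = [j ++ xs] := by
  induction xs generalizing j with
  | nil => simp
  | cons x xs ih => simp [addBucket, ih]

theorem bubSort_eq_bubLoop (lis : List Int) :
    bubSort lis = bubLoop lis.length lis := by
  cases lis with
  | nil => rfl
  | cons x xs =>
    show ((((x :: xs).foldl addBucket []).map (fun j => bubLoop j.length j)).foldl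
      (fun acc j => acc ++ j) []) = _
    rw [List.foldl_cons]
    show ((xs.foldl addBucket [[x]]).map (fun j => bubLoop j.length j)).foldl
      (fun acc j => acc ++ j) [] = _
    rw [foldl_addBucket_single]
    simp

-- ===== VERDICT (by name: the statement is the Claim_ definition above) =====
theorem bubSort_spec : Claim_equal_bubSort := by
  intro lis _
  show bubSort lis = bubSort_alt lis
  rw [bubSort_eq_bubLoop, bubSort_alt]
  exact (PySem.List.sorted_id_eq_of_perm_of_pairwise _ _
    (bubLoop_perm lis.length lis) (bubLoop_pairwise lis.length lis rfl)).symm
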